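-- pv_equiv track=rewrite | github.com/TomTilli/Labyrinth | labyrinth.py | draw_start_board
-- ===== SOURCE A (Python) =====
-- def draw_start_board(size:int, start_position:int)->tuple:
--     """Draws the game_board list as a board for a visual representation of the start of the game.
--
--     Args:
--         loc_x (int): The x value on the game board (0-9) of the players current position
--         loc_y (int): The y value on the game board (0-9) of the players current position
--     """
--     #Introduce a new list to be used as the game board visible to the player
--     game_board = []
--     #Draw the edges and the current location of the player
--     for i in range(size):
--         #Introduced a temporary list to insert the values of a row which is the appended to the game_board
--         temporary_list = []
--         for k in range(size):
--             if i == 0: #top row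
--                     temporary_list.append(" x ")
--             elif i == size - 1: #bottom row
--                 if k == start_position:
--                     temporary_list.append(r"\o>")
--                 else:
--                     temporary_list.append(" x ")
--             else:
--                 if k == 0 or k == size - 1:
--                     temporary_list.append(" x ")
--                 else:
--                     temporary_list.append("   ")
--         #here the newly made row is appended to the game_board and the loop starts again to make the next row
--         game_board.append(temporary_list)
--
--     return tuple(game_board)
-- ===== SOURCE B (Python) =====
-- def draw_start_board(size: int, start_position: int) -> tuple:
--     """Build the start board from three row templates instead of per-cell branching."""
--     n = max(size, 0)
--     top = [" x "] * n
--     if n == 0: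
--         return ()
--     if n == 1:
--         return (top,)
--     interior = [" x "] + ["   "] * (n - 2) + [" x "]
--     bottom = [" x "] * n
--     if 0 <= start_position < n:
--         bottom[start_position] = r"\o>"
--     rows = [top] + [list(interior) for _ in range(n - 2)] + [bottom]
--     return tuple(rows)
-- ===== Notes on version B (the rewrite author's own statement) =====
-- stated objective: simpler
-- what changed: B builds the three row templates (top, interior, bottom-with-marker) once by list multiplication/concatenation and assembles the board from them, instead of A's doubly nested loop branching per cell.
import Mathlib
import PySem

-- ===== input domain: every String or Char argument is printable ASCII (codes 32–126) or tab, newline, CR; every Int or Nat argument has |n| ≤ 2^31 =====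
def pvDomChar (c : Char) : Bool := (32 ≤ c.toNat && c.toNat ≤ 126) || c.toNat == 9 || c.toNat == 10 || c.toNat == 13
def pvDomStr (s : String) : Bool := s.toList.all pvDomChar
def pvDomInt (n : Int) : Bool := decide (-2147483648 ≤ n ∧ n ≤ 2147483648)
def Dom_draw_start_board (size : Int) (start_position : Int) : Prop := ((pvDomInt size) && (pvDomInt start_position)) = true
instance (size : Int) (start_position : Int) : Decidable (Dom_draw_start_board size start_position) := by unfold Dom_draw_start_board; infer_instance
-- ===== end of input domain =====

-- B assembles the board from three row templates (top/interior/bottom) instead of A's per-cell branching; objective: simpler.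

-- ===== PORT A =====
def draw_start_board (size : Int) (start_position : Int) : List (List String) :=
  (PySem.List.pyRange 0 size 1).foldl (fun game_board i =>
    game_board ++
      [ (PySem.List.pyRange 0 size 1).foldl (fun temporary_list k =>
          if i = 0 then temporary_list ++ [" x "]
          else if i = size - 1 then
            if k = start_position then temporary_list ++ ["\\o>"]
            else temporary_list ++ [" x "]
          else
            if k = 0 ∨ k = size - 1 then temporary_list ++ [" x "]
            else temporary_list ++ ["   "]) [] ]) []

-- ===== PORT B =====
def draw_start_board_alt (size : Int) (start_position : Int) : List (List String) :=
  let n := size.toNat            -- n = max(size, 0)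
  let top := List.replicate n " x "
  if n = 0 then []
  else if n = 1 then [top]
  else
    let interior := [" x "] ++ List.replicate (n - 2) "   " ++ [" x "]
    let bottom :=
      if 0 ≤ start_position ∧ start_position < (n : Int) then
        (List.replicate n " x ").set start_position.toNat "\\o>"
      else List.replicate n " x "
    [top] ++ List.replicate (n - 2) interior ++ [bottom]

-- ===== PRECONDITION & SPEC =====
def Spec_draw_start_board (size : Int) (start_position : Int) (out : List (List String)) : Prop := out = draw_start_board_alt size start_position
instance (size : Int) (start_position : Int) (out : List (List String)) : Decidable (Spec_draw_start_board size start_position out) := by unfold Spec_draw_start_board; infer_instance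

-- ===== CLAIM (what is proved, stated in full; the proofs are below) =====
def Claim_equal_draw_start_board : Prop := ∀ (size : Int) (start_position : Int), Dom_draw_start_board size start_position → Spec_draw_start_board size start_position (draw_start_board size start_position)

-- ===== LEMMAS AND PROOFS =====

-- the per-cell value A computes at row i, column k
def pvCell (size start_position i k : Int) : String :=
  if i = 0 then " x "
  else if i = size - 1 then (if k = start_position then "\\o>" else " x ")
  else if k = 0 ∨ k = size - 1 then " x " else "   "

-- zeta-reduced form of the B port, for rewriting
theorem alt_unfold (size start_position : Int) :
    draw_start_board_alt size start_position =
      if size.toNat = 0 then []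
      else if size.toNat = 1 then [List.replicate size.toNat " x "]
      else
        [List.replicate size.toNat " x "] ++
          List.replicate (size.toNat - 2)
            ([" x "] ++ List.replicate (size.toNat - 2) "   " ++ [" x "]) ++
          [if 0 ≤ start_position ∧ start_position < (size.toNat : Int) then
              (List.replicate size.toNat " x ").set start_position.toNat "\\o>"
            else List.replicate size.toNat " x "] := rfl

theorem drawA_eq_map (size start_position : Int) :
    draw_start_board size start_position =
      (PySem.List.pyRange 0 size 1).map (fun i =>
        (PySem.List.pyRange 0 size 1).map (fun k => pvCell size start_position i k)) := by
  unfold draw_start_board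
  have hfun : ∀ i : Int,
      (fun (temporary_list : List String) (k : Int) =>
          if i = 0 then temporary_list ++ [" x "]
          else if i = size - 1 then
            if k = start_position then temporary_list ++ ["\\o>"]
            else temporary_list ++ [" x "]
          else
            if k = 0 ∨ k = size - 1 then temporary_list ++ [" x "]
            else temporary_list ++ ["   "])
        = fun temporary_list k => temporary_list ++ [pvCell size start_position i k] := by
    intro i; funext tl k; unfold pvCell; split_ifs <;> rfl
  have houter :
      (fun (game_board : List (List String)) (i : Int) =>
          game_board ++
            [(PySem.List.pyRange 0 size 1).foldl (fun temporary_list k =>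
              if i = 0 then temporary_list ++ [" x "]
              else if i = size - 1 then
                if k = start_position then temporary_list ++ ["\\o>"]
                else temporary_list ++ [" x "]
              else
                if k = 0 ∨ k = size - 1 then temporary_list ++ [" x "]
                else temporary_list ++ ["   "]) []])
        = fun game_board i =>
            game_board ++ [(PySem.List.pyRange 0 size 1).map (fun k => pvCell size start_position i k)] := by
    funext gb i
    rw [hfun i, PySem.List.foldl_append_singleton_eq_map, List.nil_append]
  rw [houter, PySem.List.foldl_append_singleton_eq_map, List.nil_append]

-- splitting range(size) (size ≥ 2) into first index, middle indices, last index
theorem range_split (size : Int) (h2 : 2 ≤ size) :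
    PySem.List.pyRange 0 size 1 =
      [0] ++ PySem.List.pyRange 1 (size - 1) 1 ++ [size - 1] := by
  rw [PySem.List.pyRange_one_append 0 1 size (by omega) (by omega),
    PySem.List.pyRange_one_append 1 (size - 1) size (by omega) (by omega)]
  rw [show PySem.List.pyRange 0 1 1 = [0] by
        simpa using PySem.List.pyRange_one_singleton (0 : Int),
      show PySem.List.pyRange (size - 1) size 1 = [size - 1] by
        simpa using PySem.List.pyRange_one_singleton (size - 1), List.append_assoc]

-- the top row of A is the replicate template
theorem top_row (size start_position : Int) :
    (PySem.List.pyRange 0 size 1).map (fun k => pvCell size start_position 0 k) =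
      List.replicate size.toNat " x " := by
  have : (fun k => pvCell size start_position 0 k) = fun (_ : Int) => " x " := by
    funext k; simp [pvCell]
  rw [this, List.map_const', PySem.List.length_pyRange_one]
  congr 1; omega

-- an interior row of A is the interior template
theorem interior_row (size start_position i : Int) (h2 : 2 ≤ size)
    (hi0 : ¬ i = 0) (hil : ¬ i = size - 1) :
    (PySem.List.pyRange 0 size 1).map (fun k => pvCell size start_position i k) =
      [" x "] ++ List.replicate (size.toNat - 2) "   " ++ [" x "] := by
  rw [range_split size h2, List.map_append, List.map_append]
  congr 1
  congr 1
  · simp [pvCell, hi0, hil]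
  · rw [List.map_congr_left (g := fun (_ : Int) => "   ") (by
      intro k hk
      rw [PySem.List.mem_pyRange_one] at hk
      simp [pvCell, hi0, hil]
      omega)]
    rw [List.map_const', PySem.List.length_pyRange_one]
    congr 1; omega
  · simp [pvCell, hi0, hil]

-- the bottom row of A is the (possibly marked) replicate template
theorem bottom_row (size start_position : Int) (h2 : 2 ≤ size) :
    (PySem.List.pyRange 0 size 1).map (fun k => pvCell size start_position (size - 1) k) =
      (if 0 ≤ start_position ∧ start_position < ((size.toNat : Int)) then
        (List.replicate size.toNat " x ").set start_position.toNat "\\o>"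
      else List.replicate size.toNat " x ") := by
  have hi0 : ¬ (size - 1) = 0 := by omega
  have hlen : (PySem.List.pyRange 0 size 1).length = size.toNat := by
    rw [PySem.List.length_pyRange_one]; omega
  by_cases hb : 0 ≤ start_position ∧ start_position < ((size.toNat : Int))
  · rw [if_pos hb]
    apply List.ext_getElem
    · simp [hlen]
    · intro k hk hk'
      have hkN : k < size.toNat := by simpa [hlen] using hk
      rw [List.getElem_map, PySem.List.getElem_pyRange_one, zero_add, List.getElem_set]
      unfold pvCell
      rw [if_neg hi0, if_pos rfl]
      by_cases hksp : ((k : Int)) = start_position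
      · rw [if_pos hksp, if_pos (by omega)]
      · rw [if_neg hksp, if_neg (by omega), List.getElem_replicate]
  · rw [if_neg hb]
    apply List.ext_getElem
    · simp [hlen]
    · intro k hk hk'
      have hkN : k < size.toNat := by simpa [hlen] using hk
      rw [List.getElem_map, PySem.List.getElem_pyRange_one, zero_add, List.getElem_replicate]
      unfold pvCell
      rw [if_neg hi0, if_pos rfl, if_neg (by omega : ¬ ((k : Int)) = start_position)]

theorem main_eq (size start_position : Int) :
    draw_start_board size start_position = draw_start_board_alt size start_position := by
  rw [drawA_eq_map, alt_unfold]
  by_cases h0 : size.toNat = 0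
  · have hle : size ≤ 0 := by omega
    simp [h0, PySem.List.pyRange_one_eq_nil hle]
  · by_cases h1 : size.toNat = 1
    · have hs : size = 1 := by omega
      subst hs
      have hr : PySem.List.pyRange 0 1 1 = [0] := by
        simpa using PySem.List.pyRange_one_singleton (0 : Int)
      simp [hr, pvCell]
    · simp only [h0, h1, if_false]
      have h2 : 2 ≤ size := by omega
      rw [List.map_congr_left
          (g := fun (i : Int) =>
            if i = 0 then List.replicate size.toNat " x "
            else if i = size - 1 then
              (if 0 ≤ start_position ∧ start_position < ((size.toNat : Int)) then
                (List.replicate size.toNat " x ").set start_position.toNat "\\o>"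
              else List.replicate size.toNat " x ")
            else [" x "] ++ List.replicate (size.toNat - 2) "   " ++ [" x "]) (by
        intro i hi
        rw [PySem.List.mem_pyRange_one] at hi
        dsimp only
        by_cases hi0 : i = 0
        · subst hi0
          rw [if_pos rfl, top_row]
        · rw [if_neg hi0]
          by_cases hil : i = size - 1
          · subst hil
            rw [if_pos rfl, bottom_row size start_position h2]
          · rw [if_neg hil, interior_row size start_position i h2 hi0 hil])]
      rw [range_split size h2, List.map_append, List.map_append]
      congr 1
      · congr 1
        rw [List.map_congr_left
            (g := fun (_ : Int) => [" x "] ++ List.replicate (size.toNat - 2) "   " ++ [" x "]) (by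
          intro i hi
          rw [PySem.List.mem_pyRange_one] at hi
          dsimp only
          rw [if_neg (by omega : ¬ i = 0), if_neg (by omega : ¬ i = size - 1)])]
        rw [List.map_const', PySem.List.length_pyRange_one]
        congr 1; omega
      · simp [show ¬ (size - 1 = 0) by omega]

-- ===== VERDICT (by name: the statement is the Claim_ definition above) =====
theorem draw_start_board_spec : Claim_equal_draw_start_board := by
  intro size start_position _
  unfold Spec_draw_start_board
  exact main_eq size start_position
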